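-- pv_equiv track=rewrite | github.com/happytraveller-alone/Argus | backend/app/api/v1/endpoints/static_tasks_gitleaks.py | _strip_custom_toml_rules_sections
-- ===== SOURCE A (Python) =====
-- from typing import Any, Dict, List, Optional
--
-- def _strip_custom_toml_rules_sections(custom_toml: str) -> str:
--     if not custom_toml.strip():
--         return ""
--
--     lines = custom_toml.splitlines()
--     output: List[str] = []
--     in_rules_block = False
--
--     for line in lines:
--         stripped = line.strip()
--
--         if stripped.startswith("[[rules]]"):
--             in_rules_block = True
--             continue
--
--         if in_rules_block and stripped.startswith("["):
--             if stripped.startswith("[[rules]]"):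
--                 in_rules_block = True
--                 continue
--             in_rules_block = False
--
--         if not in_rules_block:
--             output.append(line)
--
--     return "\n".join(output).strip()
-- ===== SOURCE B (Python) =====
-- def _strip_custom_toml_rules_sections(custom_toml: str) -> str:
--     if not custom_toml.strip():
--         return ""
--     blocks = [[]]
--     for line in custom_toml.splitlines():
--         if line.strip().startswith("["):
--             blocks.append([line])
--         else:
--             blocks[-1].append(line)
--     kept = [b for b in blocks if not (b and b[0].strip().startswith("[[rules]]"))]
--     return "\n".join(line for b in kept for line in b).strip()
-- ===== Notes on version B (the rewrite author's own statement) =====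
-- stated objective: alternative
-- what changed: Replaces the stateful in_rules_block flag scan with a two-phase block decomposition: lines are first partitioned into header-led blocks, then whole blocks whose header starts with [[rules]] are filtered out and the rest concatenated.
import Mathlib
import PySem

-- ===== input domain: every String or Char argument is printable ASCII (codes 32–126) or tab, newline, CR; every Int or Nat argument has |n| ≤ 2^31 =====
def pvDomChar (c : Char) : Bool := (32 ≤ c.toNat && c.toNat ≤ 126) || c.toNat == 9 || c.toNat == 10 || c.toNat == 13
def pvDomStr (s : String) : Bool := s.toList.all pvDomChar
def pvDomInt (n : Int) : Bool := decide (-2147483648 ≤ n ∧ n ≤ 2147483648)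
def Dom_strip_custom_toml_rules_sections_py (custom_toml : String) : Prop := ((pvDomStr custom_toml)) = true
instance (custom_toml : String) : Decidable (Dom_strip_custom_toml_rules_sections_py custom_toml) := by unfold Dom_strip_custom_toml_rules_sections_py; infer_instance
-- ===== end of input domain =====

-- B replaces A's stateful flag scan by a partition of the lines into header-led blocks
-- followed by a filter of whole [[rules]] blocks (alternative decomposition, same cost).

-- ===== PORT A =====
-- the for-loop of A, state = (output, in_rules_block), branches in source order
def pvALoop : List String → List String → Bool → List String
  | [], output, _ => output
  | line :: rest, output, inR =>
    let stripped := PySem.Str.strip line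
    if PySem.Str.startswith stripped "[[rules]]" then pvALoop rest output true
    else if inR && PySem.Str.startswith stripped "[" then
      (if PySem.Str.startswith stripped "[[rules]]" then pvALoop rest output true
       else pvALoop rest (output ++ [line]) false)
    else if !inR then pvALoop rest (output ++ [line]) inR
    else pvALoop rest output inR

def strip_custom_toml_rules_sections_py (custom_toml : String) : String :=
  if PySem.Str.strip custom_toml == "" then ""
  else PySem.Str.strip (PySem.Str.join "\n" (pvALoop (PySem.Str.splitlines custom_toml) [] false))

-- ===== PORT B =====
-- blocks[-1].append(line)
def pvAppendLast : List (List String) → String → List (List String)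
  | [], l => [[l]]
  | [b], l => [b ++ [l]]
  | b :: bs, l => b :: pvAppendLast bs l

-- phase 1: partition the lines into an initial preamble block plus header-led blocks
def pvBlocks (lines : List String) : List (List String) :=
  lines.foldl (fun bs line =>
    if PySem.Str.startswith (PySem.Str.strip line) "[" then bs ++ [[line]]
    else pvAppendLast bs line) [[]]

-- phase 2 predicate: keep a block unless its header line starts with [[rules]]
def pvKeep : List String → Bool
  | [] => true
  | h :: _ => !(PySem.Str.startswith (PySem.Str.strip h) "[[rules]]")

def strip_custom_toml_rules_sections_py_alt (custom_toml : String) : String :=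
  if PySem.Str.strip custom_toml == "" then ""
  else PySem.Str.strip (PySem.Str.join "\n"
    (((pvBlocks (PySem.Str.splitlines custom_toml)).filter pvKeep).flatten))

-- ===== PRECONDITION & SPEC =====
def Spec_strip_custom_toml_rules_sections_py (custom_toml : String) (out : String) : Prop := out = strip_custom_toml_rules_sections_py_alt custom_toml
instance (custom_toml : String) (out : String) : Decidable (Spec_strip_custom_toml_rules_sections_py custom_toml out) := by unfold Spec_strip_custom_toml_rules_sections_py; infer_instance

-- ===== CLAIM (what is proved, stated in full; the proofs are below) =====
def Claim_equal_strip_custom_toml_rules_sections_py : Prop := ∀ (custom_toml : String), Dom_strip_custom_toml_rules_sections_py custom_toml → Spec_strip_custom_toml_rules_sections_py custom_toml (strip_custom_toml_rules_sections_py custom_toml)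

-- ===== LEMMAS AND PROOFS =====

-- common specification of the kept lines, recursion over the line list
def pvS : Bool → List String → List String
  | _, [] => []
  | inR, l :: ls =>
    if PySem.Str.startswith (PySem.Str.strip l) "[" then
      (if PySem.Str.startswith (PySem.Str.strip l) "[[rules]]" then pvS true ls
       else l :: pvS false ls)
    else if inR then pvS inR ls else l :: pvS inR ls

theorem pvRules_hdr (s : String) (h : PySem.Str.startswith s "[[rules]]" = true) :
    PySem.Str.startswith s "[" = true := by
  simp only [PySem.Str.startswith_eq] at *
  rw [PySem.Chars.startswith_iff] at *
  exact List.IsPrefix.trans (by decide) h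

theorem pvALoop_eq (lines : List String) :
    ∀ output inR, pvALoop lines output inR = output ++ pvS inR lines := by
  induction lines with
  | nil => intro output inR; simp [pvALoop, pvS]
  | cons l ls ih =>
    intro output inR
    by_cases hr : PySem.Str.startswith (PySem.Str.strip l) "[[rules]]" = true
    · have hh := pvRules_hdr _ hr
      simp only [pvALoop, pvS, hr, hh]
      simp [ih]
    · by_cases hh : PySem.Str.startswith (PySem.Str.strip l) "[" = true
      · cases inR <;> (simp only [pvALoop, pvS, hr, hh]; simp [ih])
      · cases inR <;> (simp only [pvALoop, pvS, hr, hh]; simp [ih])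

theorem pvAppendLast_eq (done : List (List String)) (cur : List String) (l : String) :
    pvAppendLast (done ++ [cur]) l = done ++ [cur ++ [l]] := by
  induction done with
  | nil => simp [pvAppendLast]
  | cons b bs ih =>
    cases bs with
    | nil => simp [pvAppendLast]
    | cons b' bs' => simpa [pvAppendLast] using ih

theorem pvKeep_append (cur : List String) (l : String)
    (hh : PySem.Str.startswith (PySem.Str.strip l) "[" = false) :
    pvKeep (cur ++ [l]) = pvKeep cur := by
  cases cur with
  | nil =>
    have hrl : PySem.Str.startswith (PySem.Str.strip l) "[[rules]]" = false := by
      by_contra h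
      simp only [Bool.not_eq_false] at h
      rw [pvRules_hdr _ h] at hh; exact Bool.true_eq_false.mp hh
    simp only [pvKeep, List.nil_append, hrl, Bool.not_false]
  | cons h t => simp [pvKeep]

theorem pvBlocks_eq (lines : List String) :
    ∀ (done : List (List String)) (cur : List String),
    ((lines.foldl (fun bs line =>
        if PySem.Str.startswith (PySem.Str.strip line) "[" then bs ++ [[line]]
        else pvAppendLast bs line) (done ++ [cur])).filter pvKeep).flatten
      = ((done.filter pvKeep).flatten ++ (if pvKeep cur then cur else []))
          ++ pvS (!pvKeep cur) lines := by
  induction lines with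
  | nil =>
    intro done cur
    simp only [List.foldl_nil, pvS, List.filter_append, List.flatten_append, List.append_nil]
    cases h : pvKeep cur <;> simp [List.filter, h]
  | cons l ls ih =>
    intro done cur
    simp only [List.foldl_cons]
    by_cases hh : PySem.Str.startswith (PySem.Str.strip l) "[" = true
    · rw [hh, if_pos rfl]
      rw [ih (done ++ [cur]) [l]]
      by_cases hr : PySem.Str.startswith (PySem.Str.strip l) "[[rules]]" = true
      · have hk : pvKeep [l] = false := by simp only [pvKeep, hr, Bool.not_true]
        simp only [pvS, hh, hr, hk, Bool.not_false, Bool.false_eq_true, if_false]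
        cases hc : pvKeep cur <;> simp [List.filter_append, List.filter, hc]
      · have hr' : PySem.Str.startswith (PySem.Str.strip l) "[[rules]]" = false := by
          simpa using hr
        have hk : pvKeep [l] = true := by simp only [pvKeep, hr', Bool.not_false]
        simp only [pvS, hh, hr', hk, Bool.not_true, Bool.false_eq_true, if_false,
          if_true]
        cases hc : pvKeep cur <;> simp [List.filter_append, List.filter, hc]
    · simp only [Bool.not_eq_true] at hh
      rw [hh]
      simp only [Bool.false_eq_true, if_false, pvAppendLast_eq]
      rw [ih done (cur ++ [l])]
      simp only [pvS, hh, Bool.false_eq_true, if_false, pvKeep_append cur l hh]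
      cases hc : pvKeep cur <;> simp [hc]

theorem pvCore_eq (lines : List String) :
    pvALoop lines [] false = ((pvBlocks lines).filter pvKeep).flatten := by
  rw [pvALoop_eq, pvBlocks]
  have := pvBlocks_eq lines [] []
  simp only [List.nil_append] at this
  rw [this]
  simp [pvKeep]

-- ===== VERDICT (by name: the statement is the Claim_ definition above) =====
theorem strip_custom_toml_rules_sections_py_spec : Claim_equal_strip_custom_toml_rules_sections_py := by
  intro custom_toml _
  unfold Spec_strip_custom_toml_rules_sections_py strip_custom_toml_rules_sections_py strip_custom_toml_rules_sections_py_alt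
  rw [pvCore_eq]
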